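-- pv_equiv track=rewrite | github.com/username161781/config2 | stage4.py | build_full_graph
-- ===== SOURCE A (Python) =====
-- from collections import defaultdict, deque
--
-- def build_full_graph(repo_map, start_nodes=None, max_depth=10, exclude_substr=""):
--     """
--     Построим транзитивный граф для всех узлов встречающихся в repo_map (упрощённо).
--     Для небольших тестовых репозиториев этого достаточно.
--     """
--     graph = defaultdict(set)
--     # простой BFS без рекурсии здесь — достаточно
--     for start in repo_map.keys():
--         visited = set([start])
--         q = deque([(start, 0)])
--         while q:
--             node, depth = q.popleft()
--             if depth >= max_depth:
--                 continue
--             for nb in repo_map.get(node, []):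
--                 if exclude_substr and exclude_substr in nb:
--                     continue
--                 graph[start].add(nb)
--                 if nb not in visited:
--                     visited.add(nb)
--                     q.append((nb, depth+1))
--     return graph
-- ===== SOURCE B (Python) =====
-- def build_full_graph(repo_map, start_nodes=None, max_depth=10, exclude_substr=""):
--     """Two-phase re-implementation: phase 1 recursively computes the explicit BFS
--     level lists (no queue, no interleaved result mutation); phase 2 emits every
--     filtered neighbour of the levelled nodes in one comprehension and collapses
--     it with a single set() call."""
--     def valid(nb):
--         return not (exclude_substr and exclude_substr in nb)
--
--     def levels(frontier, seen, k):
--         if k == 0 or not frontier: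
--             return [frontier]
--         nxt = []
--         for node in frontier:
--             for nb in repo_map.get(node, []):
--                 if valid(nb) and nb not in seen:
--                     seen.add(nb)
--                     nxt.append(nb)
--         return [frontier] + levels(nxt, seen, k - 1)
--
--     graph = {}
--     for start in repo_map:
--         if max_depth <= 0:
--             continue
--         lvls = levels([start], {start}, max_depth - 1)
--         emitted = [nb for lv in lvls for node in lv
--                    for nb in repo_map.get(node, []) if valid(nb)]
--         if emitted:
--             graph[start] = set(emitted)
--     return graph
-- ===== Notes on version B (the rewrite author's own statement) =====
-- stated objective: alternative
-- what changed: Splits A's single interleaved deque-BFS (which mutates graph[start] while traversing) into two separate phases: a recursive function that materialises the explicit BFS level lists, then a flat comprehension over those levels that emits the filtered neighbours and one final set() call per start; a plain dict replaces the defaultdict.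
import Mathlib
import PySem

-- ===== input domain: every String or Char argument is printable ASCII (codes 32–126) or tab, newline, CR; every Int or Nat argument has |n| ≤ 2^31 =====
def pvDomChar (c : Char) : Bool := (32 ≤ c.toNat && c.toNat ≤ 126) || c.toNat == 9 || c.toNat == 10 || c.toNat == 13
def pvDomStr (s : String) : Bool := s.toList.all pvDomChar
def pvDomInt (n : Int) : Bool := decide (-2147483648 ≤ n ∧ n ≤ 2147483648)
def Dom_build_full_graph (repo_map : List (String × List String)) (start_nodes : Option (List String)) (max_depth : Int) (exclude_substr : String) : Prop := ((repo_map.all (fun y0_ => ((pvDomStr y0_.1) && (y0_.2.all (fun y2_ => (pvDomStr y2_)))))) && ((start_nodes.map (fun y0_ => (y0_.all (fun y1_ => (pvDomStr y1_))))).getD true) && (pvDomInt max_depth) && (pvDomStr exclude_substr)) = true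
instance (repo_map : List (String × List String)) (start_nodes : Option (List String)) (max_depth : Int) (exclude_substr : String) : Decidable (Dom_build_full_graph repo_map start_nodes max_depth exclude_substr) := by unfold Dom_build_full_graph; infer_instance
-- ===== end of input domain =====

-- B replaces A's single interleaved deque-BFS by two separate phases per start: a recursive
-- computation of the explicit BFS level lists, then one emission pass over those levels
-- collapsed by a single set(); same return value, objective: alternative. start_nodes is
-- unused by the Python A and stays unused.

-- ===== PORT A =====
-- A's inner `for nb in repo_map.get(node, [])` loop; state = (graph[start], visited, queue appends)
def pvNbrsA (ex : String) (depth : Int) (nbs : List String)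
    (st : PySem.Set String × PySem.Set String × List (String × Int)) :
    PySem.Set String × PySem.Set String × List (String × Int) :=
  nbs.foldl (fun st nb =>
    if ex ≠ "" ∧ PySem.Str.isIn ex nb = true then st
    else
      let g := PySem.Set.add st.1 nb
      if PySem.Set.contains st.2.1 nb = true then (g, st.2.1, st.2.2)
      else (g, PySem.Set.add st.2.1 nb, st.2.2 ++ [(nb, depth + 1)])) st

-- A's `while q` loop, with a fuel bound (2 + total neighbour count exceeds the number of
-- iterations: each iteration pops one entry, and every enqueue after the first marks a
-- previously unvisited neighbour string as visited)
def pvLoopA (rm : PySem.Dict String (List String)) (md : Int) (ex : String) :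
    Nat → List (String × Int) → PySem.Set String → PySem.Set String → PySem.Set String
  | 0, _, _, g => g
  | _ + 1, [], _, g => g
  | fuel + 1, (node, depth) :: q, v, g =>
    if md ≤ depth then pvLoopA rm md ex fuel q v g
    else
      let st := pvNbrsA ex depth (rm.getD node []) (g, v, [])
      pvLoopA rm md ex fuel (q ++ st.2.2) st.2.1 st.1

def pvBfsA (rm : PySem.Dict String (List String)) (md : Int) (ex : String) (start : String) :
    PySem.Set String :=
  pvLoopA rm md ex (2 + rm.values.flatten.length) [(start, 0)] (PySem.Set.ofList [start])
    PySem.Set.empty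

-- per start, graph[start] is only touched during that start's BFS, and the defaultdict gets
-- the key iff at least one add happened, i.e. iff the final set is nonempty
def build_full_graph (repo_map : List (String × List String)) (start_nodes : Option (List String)) (max_depth : Int) (exclude_substr : String) : List (String × List String) :=
  let rm := PySem.Dict.ofList repo_map
  (rm.keys.foldl (fun acc start =>
      let s := pvBfsA rm max_depth exclude_substr start
      if s = [] then acc else acc.insert start s) PySem.Dict.empty).items

-- ===== PORT B =====
-- B's `valid(nb)` helper
def pvValid (ex nb : String) : Bool := !((ex != "") && PySem.Str.isIn ex nb)

-- the filtered adjacency of one node (`for nb in repo_map.get(node, []) if valid(nb)`)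
def pvAdjF (rm : PySem.Dict String (List String)) (ex : String) (node : String) : List String :=
  (rm.getD node []).filter (fun nb => pvValid ex nb)

-- B's inner `for nb in repo_map.get(node, [])` loop inside levels; state = (seen, nxt)
def pvStep (ex : String) (nbs : List String) (st : PySem.Set String × List String) :
    PySem.Set String × List String :=
  nbs.foldl (fun st nb =>
    if pvValid ex nb && !(PySem.Set.contains st.1 nb) then
      (PySem.Set.add st.1 nb, st.2 ++ [nb])
    else st) st

-- B's `for node in frontier` loop building the next level
def pvNextF (rm : PySem.Dict String (List String)) (ex : String) (frontier : List String)
    (st : PySem.Set String × List String) : PySem.Set String × List String :=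
  frontier.foldl (fun st node => pvStep ex (rm.getD node []) st) st

-- B's recursive `levels(frontier, seen, k)` (seen threaded as state)
def pvLevels (rm : PySem.Dict String (List String)) (ex : String) :
    Nat → List String → PySem.Set String → List (List String)
  | 0, fr, _ => [fr]
  | k + 1, fr, seen =>
    if fr = [] then [fr]
    else
      let st := pvNextF rm ex fr (seen, [])
      fr :: pvLevels rm ex k st.2 st.1

-- B's emission comprehension over the level lists
def pvEmit (rm : PySem.Dict String (List String)) (ex : String) (lvls : List (List String)) :
    List String :=
  lvls.flatten.flatMap (fun node => pvAdjF rm ex node)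

def build_full_graph_alt (repo_map : List (String × List String)) (start_nodes : Option (List String)) (max_depth : Int) (exclude_substr : String) : List (String × List String) :=
  let rm := PySem.Dict.ofList repo_map
  (rm.keys.foldl (fun acc start =>
      if max_depth ≤ 0 then acc
      else
        let em := pvEmit rm exclude_substr
          (pvLevels rm exclude_substr (max_depth - 1).toNat [start] (PySem.Set.ofList [start]))
        if em = [] then acc else acc.insert start (PySem.Set.ofList em)) PySem.Dict.empty).items

-- ===== PRECONDITION & SPEC =====
def Spec_build_full_graph (repo_map : List (String × List String)) (start_nodes : Option (List String)) (max_depth : Int) (exclude_substr : String) (out : List (String × List String)) : Prop := out = build_full_graph_alt repo_map start_nodes max_depth exclude_substr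
instance (repo_map : List (String × List String)) (start_nodes : Option (List String)) (max_depth : Int) (exclude_substr : String) (out : List (String × List String)) : Decidable (Spec_build_full_graph repo_map start_nodes max_depth exclude_substr out) := by unfold Spec_build_full_graph; infer_instance

-- ===== CLAIM (what is proved, stated in full; the proofs are below) =====
def Claim_equal_build_full_graph : Prop := ∀ (repo_map : List (String × List String)) (start_nodes : Option (List String)) (max_depth : Int) (exclude_substr : String), Dom_build_full_graph repo_map start_nodes max_depth exclude_substr → Spec_build_full_graph repo_map start_nodes max_depth exclude_substr (build_full_graph repo_map start_nodes max_depth exclude_substr)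

-- ===== LEMMAS AND PROOFS =====

-- A's exclusion test and B's `valid` are complementary
lemma pvValid_false (ex nb : String) :
    pvValid ex nb = false ↔ (ex ≠ "" ∧ PySem.Str.isIn ex nb = true) := by
  simp [pvValid, bne_iff_ne]

-- B's emission loop, fused over the levels: what pvEmit ∘ pvLevels computes
def pvEmitLoop (rm : PySem.Dict String (List String)) (ex : String) :
    Nat → List String → PySem.Set String → List String
  | 0, fr, _ => fr.flatMap (fun node => pvAdjF rm ex node)
  | k + 1, fr, seen =>
    if fr = [] then []
    else
      let st := pvNextF rm ex fr (seen, [])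
      fr.flatMap (fun node => pvAdjF rm ex node) ++ pvEmitLoop rm ex k st.2 st.1

-- B's emission resumed from the middle of a level: cur = unscanned rest of the current
-- frontier, next = partial next frontier, r = max_depth - depth
def pvECont (rm : PySem.Dict String (List String)) (ex : String) (r : Int)
    (cur next : List String) (seen : PySem.Set String) : List String :=
  if r ≤ 0 then []
  else
    let st := pvNextF rm ex cur (seen, next)
    cur.flatMap (fun node => pvAdjF rm ex node) ++
      (if r ≤ 1 then [] else pvEmitLoop rm ex (r - 2).toNat st.2 st.1)

-- number of elements of U not yet seen (A's loop measure)
def pvCnt (U v : List String) : Nat := (U.filter (fun x => !(PySem.Set.contains v x))).length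

lemma pvNbrsA_cons (ex : String) (d : Int) (nb : String) (rest : List String)
    (st : PySem.Set String × PySem.Set String × List (String × Int)) :
    pvNbrsA ex d (nb :: rest) st =
      pvNbrsA ex d rest
        (if ex ≠ "" ∧ PySem.Str.isIn ex nb = true then st
         else
           if PySem.Set.contains st.2.1 nb = true then (PySem.Set.add st.1 nb, st.2.1, st.2.2)
           else (PySem.Set.add st.1 nb, PySem.Set.add st.2.1 nb, st.2.2 ++ [(nb, d + 1)])) := by
  simp only [pvNbrsA, List.foldl_cons]

lemma pvStep_cons (ex nb : String) (rest : List String) (st : PySem.Set String × List String) :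
    pvStep ex (nb :: rest) st =
      pvStep ex rest
        (if pvValid ex nb && !(PySem.Set.contains st.1 nb) then
          (PySem.Set.add st.1 nb, st.2 ++ [nb])
         else st) := by
  simp only [pvStep, List.foldl_cons]

-- A's neighbour scan = (graph updated with the filtered adjacency, B's pvStep on (seen, nxt))
lemma pvNbrsA_decomp (rm : PySem.Dict String (List String)) (ex : String) (d : Int)
    (nbs : List String) :
    ∀ (g v : PySem.Set String) (nx : List String),
    pvNbrsA ex d nbs (g, v, nx.map (fun x => (x, d + 1))) =
      (PySem.Set.update g (nbs.filter (fun nb => pvValid ex nb)),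
       (pvStep ex nbs (v, nx)).1,
       (pvStep ex nbs (v, nx)).2.map (fun x => (x, d + 1))) := by
  induction nbs with
  | nil => intro g v nx; simp [pvNbrsA, pvStep, PySem.Set.update]
  | cons nb rest ih =>
    intro g v nx
    rw [pvNbrsA_cons, pvStep_cons]
    dsimp only
    by_cases h1 : ex ≠ "" ∧ PySem.Str.isIn ex nb = true
    · have hv : pvValid ex nb = false := (pvValid_false ex nb).2 h1
      rw [if_pos h1,
        if_neg (by simp [hv] : ¬ (pvValid ex nb && !(PySem.Set.contains v nb)) = true),
        List.filter_cons_of_neg (by simp [hv])]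
      exact ih g v nx
    · have hv : pvValid ex nb = true := by
        cases h : pvValid ex nb
        · exact absurd ((pvValid_false ex nb).1 h) h1
        · rfl
      rw [if_neg h1, List.filter_cons_of_pos (by simp [hv]), PySem.Set.update_cons]
      by_cases h2 : PySem.Set.contains v nb = true
      · rw [if_pos h2,
          if_neg (by rw [hv, h2]; simp : ¬ ((pvValid ex nb && !(PySem.Set.contains v nb)) = true))]
        exact ih (PySem.Set.add g nb) v nx
      · have h2' : PySem.Set.contains v nb = false := by
          cases h : PySem.Set.contains v nb
          · rfl
          · exact absurd h h2
        rw [if_neg h2,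
          if_pos (by rw [hv, h2']; rfl : (pvValid ex nb && !(PySem.Set.contains v nb)) = true)]
        rw [show nx.map (fun x => (x, d + 1)) ++ [(nb, d + 1)]
              = (nx ++ [nb]).map (fun x => (x, d + 1)) by simp]
        exact ih (PySem.Set.add g nb) (PySem.Set.add v nb) (nx ++ [nb])

lemma pvCnt_add (U v : List String) (x : String) (hnd : U.Nodup) (hx : x ∈ U)
    (hv : PySem.Set.contains v x = false) :
    pvCnt U (PySem.Set.add v x) + 1 = pvCnt U v := by
  have hxv : x ∉ v := by
    intro h; rw [(PySem.Set.contains_iff v x).2 h] at hv; cases hv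
  have hadd : PySem.Set.add v x = v ++ [x] := PySem.Set.add_of_not_mem hxv
  unfold pvCnt
  rw [hadd]
  have hpred : (fun y => !(PySem.Set.contains (v ++ [x]) y))
      = fun y => (!(PySem.Set.contains v y)) && !(y == x) := by
    funext y
    simp only [PySem.Set.contains_eq_listContains, List.contains_append]
    cases h1 : (v).contains y <;> cases h2 : (y == x) <;> simp_all
  rw [hpred]
  have hff : U.filter (fun y => (!(PySem.Set.contains v y)) && !(y == x))
      = (U.filter (fun y => !(PySem.Set.contains v y))).filter (fun y => !(y == x)) := by
    rw [List.filter_filter]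
    congr 1; funext y; rw [Bool.and_comm]
  rw [hff]
  have hmem : x ∈ U.filter (fun y => !(PySem.Set.contains v y)) := by
    rw [List.mem_filter]; exact ⟨hx, by simpa using hxv⟩
  have hndf : (U.filter (fun y => !(PySem.Set.contains v y))).Nodup := hnd.filter _
  have herase : (U.filter (fun y => !(PySem.Set.contains v y))).filter (fun y => !(y == x))
      = (U.filter (fun y => !(PySem.Set.contains v y))).erase x := by
    rw [hndf.erase_eq_filter]
    congr 1
  rw [herase, List.length_erase_of_mem hmem]
  have := List.length_pos_of_mem hmem
  omega

-- pvStep preserves the measure: seen grows exactly by what nxt gains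
lemma pvPhi (ex : String) (U : List String) (hnd : U.Nodup) :
    ∀ (nbs : List String) (v : PySem.Set String) (nx : List String),
      (∀ x ∈ nbs, x ∈ U) →
      pvCnt U (pvStep ex nbs (v, nx)).1 + (pvStep ex nbs (v, nx)).2.length =
        pvCnt U v + nx.length := by
  intro nbs
  induction nbs with
  | nil => intro v nx _; simp [pvStep]
  | cons nb rest ih =>
    intro v nx hsub
    rw [pvStep_cons]
    dsimp only
    by_cases hc : (pvValid ex nb && !(PySem.Set.contains v nb)) = true
    · rw [if_pos hc]
      rw [ih _ (nx ++ [nb]) (fun x hx => hsub x (List.mem_cons_of_mem _ hx))]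
      have hcf : PySem.Set.contains v nb = false := by
        cases h : PySem.Set.contains v nb
        · rfl
        · rw [h] at hc; simp at hc
      have := pvCnt_add U v nb hnd (hsub nb List.mem_cons_self) hcf
      simp only [List.length_append, List.length_cons, List.length_nil]
      omega
    · rw [if_neg hc]
      exact ih v nx (fun x hx => hsub x (List.mem_cons_of_mem _ hx))

lemma pvStep_append (ex : String) (nbs : List String) :
    ∀ (v : PySem.Set String) (nx : List String),
    pvStep ex nbs (v, nx) =
      ((pvStep ex nbs (v, [])).1, nx ++ (pvStep ex nbs (v, [])).2) := by
  induction nbs with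
  | nil => intro v nx; simp [pvStep]
  | cons nb rest ih =>
    intro v nx
    rw [pvStep_cons, pvStep_cons]
    dsimp only
    by_cases hc : (pvValid ex nb && !(PySem.Set.contains v nb)) = true
    · rw [if_pos hc, if_pos hc]
      rw [ih _ (nx ++ [nb]), ih _ ([] ++ [nb])]
      simp
    · rw [if_neg hc, if_neg hc]
      exact ih v nx

lemma pvSkipAll (rm : PySem.Dict String (List String)) (md : Int) (ex : String) :
    ∀ (fuel : Nat) (q : List (String × Int)) (v g : PySem.Set String),
      (∀ p ∈ q, md ≤ p.2) → pvLoopA rm md ex fuel q v g = g := by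
  intro fuel
  induction fuel with
  | zero => intro q v g _; rfl
  | succ n ih =>
    intro q v g hq
    cases q with
    | nil => rfl
    | cons p q' =>
      obtain ⟨node, depth⟩ := p
      rw [pvLoopA, if_pos (hq _ List.mem_cons_self)]
      exact ih q' v g (fun p hp => hq p (List.mem_cons_of_mem _ hp))

lemma pvGetD_sub_U (rm : PySem.Dict String (List String)) (node x : String)
    (hx : x ∈ rm.getD node []) : x ∈ PySem.Set.ofList rm.values.flatten := by
  rw [PySem.Set.mem_ofList]
  cases h : rm.get? node with
  | none => rw [PySem.Dict.getD_eq_get?_getD, h] at hx; cases hx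
  | some l =>
    rw [PySem.Dict.getD_eq_get?_getD, h] at hx
    exact List.mem_flatten.2
      ⟨l, List.mem_map_of_mem (PySem.Dict.mem_items_of_get?_eq_some rm h), hx⟩

lemma pvEmitLoop_nil (rm : PySem.Dict String (List String)) (ex : String) (k : Nat)
    (seen : PySem.Set String) : pvEmitLoop rm ex k [] seen = [] := by
  cases k <;> simp [pvEmitLoop]

-- fusing B's two phases: emission of the level lists = the emission loop
lemma pvEmit_levels (rm : PySem.Dict String (List String)) (ex : String) :
    ∀ (k : Nat) (fr : List String) (seen : PySem.Set String),
      pvEmit rm ex (pvLevels rm ex k fr seen) = pvEmitLoop rm ex k fr seen := by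
  intro k
  induction k with
  | zero => intro fr seen; simp [pvLevels, pvEmit, pvEmitLoop]
  | succ n ih =>
    intro fr seen
    rw [pvLevels, pvEmitLoop]
    by_cases h : fr = []
    · subst h; simp [pvEmit]
    · rw [if_neg h, if_neg h]
      dsimp only
      rw [← ih]
      simp [pvEmit]

-- the heart of the proof: from a queue of the form cur@depth d ++ next@depth d+1, A's loop
-- returns its graph set updated with exactly B's remaining emission sequence
lemma pvBridge (rm : PySem.Dict String (List String)) (md : Int) (ex : String)
    (U : List String) (hnd : U.Nodup)
    (hU : ∀ node x, x ∈ rm.getD node [] → x ∈ U) :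
    ∀ (fuel : Nat) (d : Int) (cur next : List String) (v g : PySem.Set String),
      cur.length + next.length + pvCnt U v < fuel →
      pvLoopA rm md ex fuel
          (cur.map (fun x => (x, d)) ++ next.map (fun x => (x, d + 1))) v g =
        PySem.Set.update g (pvECont rm ex (md - d) cur next v) := by
  intro fuel
  induction fuel with
  | zero => intro d cur next v g h; omega
  | succ n ih =>
    intro d cur next v g hm
    cases cur with
    | cons c cs =>
      simp only [List.map_cons, List.cons_append]
      rw [pvLoopA]
      by_cases hd : md ≤ d
      · rw [if_pos hd, pvSkipAll, pvECont, if_pos (by omega)]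
        · rfl
        · intro p hp
          rcases List.mem_append.1 hp with h | h <;>
            · rcases List.mem_map.1 h with ⟨x, _, rfl⟩; omega
      · rw [if_neg hd]
        have hdec := pvNbrsA_decomp rm ex d (rm.getD c []) g v []
        simp only [List.map_nil] at hdec
        dsimp only
        rw [hdec]
        have hphi := pvPhi ex U hnd (rm.getD c []) v [] (fun x hx => hU c x hx)
        simp only [List.length_nil] at hphi
        rw [show (cs.map (fun x => (x, d)) ++ next.map (fun x => (x, d + 1)))
                ++ ((pvStep ex (rm.getD c []) (v, [])).2.map (fun x => (x, d + 1)))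
              = cs.map (fun x => (x, d))
                ++ ((next ++ (pvStep ex (rm.getD c []) (v, [])).2).map
                      (fun x => (x, d + 1))) by simp]
        rw [ih d cs (next ++ (pvStep ex (rm.getD c []) (v, [])).2)
              (pvStep ex (rm.getD c []) (v, [])).1
              (PySem.Set.update g ((rm.getD c []).filter (fun nb => pvValid ex nb)))
              (by simp only [List.length_append, List.length_cons] at hm ⊢; omega)]
        rw [← PySem.Set.update_append]
        congr 1
        -- pvECont r (c::cs) next v = adjF c ++ pvECont r cs (next ++ new) v'
        rw [pvECont, pvECont, if_neg (by omega), if_neg (by omega)]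
        dsimp only
        have hNF : pvNextF rm ex (c :: cs) (v, next)
            = pvNextF rm ex cs ((pvStep ex (rm.getD c []) (v, [])).1,
                next ++ (pvStep ex (rm.getD c []) (v, [])).2) := by
          simp only [pvNextF, List.foldl_cons]
          rw [pvStep_append ex (rm.getD c []) v next]
        rw [hNF]
        simp [pvAdjF, List.flatMap_cons]
    | nil =>
      cases next with
      | nil =>
        simp only [List.map_nil, List.nil_append]
        rw [show pvLoopA rm md ex (n + 1) [] v g = g from rfl, pvECont]
        split_ifs with h1 h2
        · rfl
        · simp
        · simp only [pvNextF, List.foldl_nil, List.flatMap_nil, List.nil_append, pvEmitLoop_nil]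
          simp
      | cons nH ns =>
        simp only [List.map_nil, List.nil_append, List.map_cons]
        rw [pvLoopA]
        by_cases hd : md ≤ d + 1
        · rw [if_pos hd, pvSkipAll, pvECont]
          · split_ifs with h1 h2
            · rfl
            · simp
            · omega
          · intro p hp
            rcases List.mem_map.1 hp with ⟨x, _, rfl⟩; omega
        · rw [if_neg hd]
          have hdec := pvNbrsA_decomp rm ex (d + 1) (rm.getD nH []) g v []
          simp only [List.map_nil] at hdec
          dsimp only
          rw [hdec]
          rw [ih (d + 1) ns (pvStep ex (rm.getD nH []) (v, [])).2
                (pvStep ex (rm.getD nH []) (v, [])).1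
                (PySem.Set.update g ((rm.getD nH []).filter (fun nb => pvValid ex nb)))
                (by
                  have hphi := pvPhi ex U hnd (rm.getD nH []) v []
                      (fun x hx => hU nH x hx)
                  simp only [List.length_nil] at hphi
                  simp only [List.length_cons, List.length_nil] at hm ⊢
                  omega)]
          rw [← PySem.Set.update_append]
          congr 1
          -- pvECont (md-d) [] (nH::ns) v = adjF nH ++ pvECont (md-d-1) ns new v'
          rw [pvECont, pvECont, if_neg (by omega), if_neg (by omega)]
          dsimp only
          rw [show pvNextF rm ex [] (v, nH :: ns) = (v, nH :: ns) from rfl]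
          simp only [List.flatMap_nil, List.nil_append]
          by_cases h2 : md - d ≤ 1
          · -- then also md - (d+1) ≤ 0, contradicting hd
            omega
          · rw [if_neg h2]
            by_cases h3 : md - (d + 1) ≤ 1
            · -- r = 2: one more expanded level, the recursion stops right after it
              rw [if_pos h3]
              rw [show (md - d - 2).toNat = 0 from by omega]
              simp [pvEmitLoop, pvAdjF, List.flatMap_cons]
            · rw [if_neg h3]
              rw [show (md - d - 2).toNat = (md - (d + 1) - 2).toNat + 1 from by omega]
              rw [pvEmitLoop, if_neg (by simp)]
              dsimp only
              have hNF : pvNextF rm ex (nH :: ns) (v, [])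
                  = pvNextF rm ex ns ((pvStep ex (rm.getD nH []) (v, [])).1,
                      (pvStep ex (rm.getD nH []) (v, [])).2) := by
                simp only [pvNextF, List.foldl_cons]
              rw [hNF]
              simp [pvAdjF, List.flatMap_cons]

lemma pvOfList_nil_iff (xs : List String) : PySem.Set.ofList xs = [] ↔ xs = [] := by
  constructor
  · intro h
    cases xs with
    | nil => rfl
    | cons x rest =>
      have : x ∈ PySem.Set.ofList (x :: rest) := (PySem.Set.mem_ofList _ _).2 List.mem_cons_self
      rw [h] at this
      cases this
  · intro h; subst h; rfl

-- pvECont started at the top of the first level = the fused emission loop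
lemma pvECont_top (rm : PySem.Dict String (List String)) (ex : String) (md : Int)
    (hmd : ¬ md ≤ 0) (start : String) (seen : PySem.Set String) :
    pvECont rm ex md [start] [] seen = pvEmitLoop rm ex (md - 1).toNat [start] seen := by
  rw [pvECont, if_neg hmd]
  dsimp only
  by_cases h1 : md ≤ 1
  · rw [if_pos h1, show (md - 1).toNat = 0 from by omega]
    simp [pvEmitLoop]
  · rw [if_neg h1, show (md - 1).toNat = (md - 2).toNat + 1 from by omega]
    rw [pvEmitLoop, if_neg (by simp)]

-- one step of the two top-level folds agree
lemma pvBody (rm : PySem.Dict String (List String)) (md : Int) (ex : String)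
    (acc : PySem.Dict String (PySem.Set String)) (start : String) :
    (let s := pvBfsA rm md ex start;
     if s = [] then acc else acc.insert start s)
    = (if md ≤ 0 then acc
       else
         let em := pvEmit rm ex (pvLevels rm ex (md - 1).toNat [start] (PySem.Set.ofList [start]))
         if em = [] then acc else acc.insert start (PySem.Set.ofList em)) := by
  by_cases hmd : md ≤ 0
  · rw [if_pos hmd]
    have hs : pvBfsA rm md ex start = [] := by
      unfold pvBfsA
      exact pvSkipAll rm md ex _ _ _ _
        (by intro p hp; simp only [List.mem_singleton] at hp; subst hp; simpa using hmd)
    simp [hs]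
  · rw [if_neg hmd]
    have hU : ∀ node x, x ∈ rm.getD node [] → x ∈ PySem.Set.ofList rm.values.flatten :=
      fun node x hx => pvGetD_sub_U rm node x hx
    have hb := pvBridge rm md ex (PySem.Set.ofList rm.values.flatten)
        (PySem.Set.nodup_ofList _) hU (2 + rm.values.flatten.length) 0 [start] []
        (PySem.Set.ofList [start]) PySem.Set.empty
        (by
          have h1 : pvCnt (PySem.Set.ofList rm.values.flatten) (PySem.Set.ofList [start])
              ≤ (PySem.Set.ofList rm.values.flatten).length := List.length_filter_le _ _
          have h2 := PySem.Set.length_ofList_le (rm.values.flatten)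
          simp only [List.length_cons, List.length_nil]
          omega)
    simp only [List.map_cons, List.map_nil, List.append_nil] at hb
    have hs : pvBfsA rm md ex start
        = PySem.Set.ofList
            (pvEmit rm ex (pvLevels rm ex (md - 1).toNat [start] (PySem.Set.ofList [start]))) := by
      unfold pvBfsA
      rw [show md - 0 = md from by omega] at hb
      rw [hb, pvECont_top rm ex md hmd, ← pvEmit_levels]
      exact PySem.Set.update_nil_left _
    dsimp only
    rw [hs]
    by_cases he : pvEmit rm ex (pvLevels rm ex (md - 1).toNat [start] (PySem.Set.ofList [start])) = []
    · rw [if_pos he, if_pos ((pvOfList_nil_iff _).2 he)]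
    · rw [if_neg he, if_neg (fun h => he ((pvOfList_nil_iff _).1 h))]

-- ===== VERDICT (by name: the statement is the Claim_ definition above) =====
theorem build_full_graph_spec : Claim_equal_build_full_graph := by
  intro repo_map start_nodes max_depth exclude_substr _
  unfold Spec_build_full_graph build_full_graph build_full_graph_alt
  dsimp only
  congr 1
  apply List.foldl_ext
  intro acc start _
  exact pvBody (PySem.Dict.ofList repo_map) max_depth exclude_substr acc start
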